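-- pv_equiv track=rewrite | github.com/Tenebriso/Advent-of-code | 2022/6/6.py | find_marker_index
-- ===== SOURCE A (Python) =====
-- def find_marker_index(line, marker_length):
--     marker = []
--     for idx, character in enumerate(line):
--         try:
--             index = marker.index(character)
--             marker = marker[index + 1::]
--         except ValueError:
--             pass
--         marker.append(character)
--         if len(marker) == marker_length:
--             return idx + 1
-- ===== SOURCE B (Python) =====
-- def find_marker_index(line, marker_length):
--     if marker_length < 1:
--         return None
--     end = marker_length
--     while end <= len(line):
--         window = line[end - marker_length:end]
--         seen = {}
--         p = -1
--         for i, ch in enumerate(window):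
--             if ch in seen and seen[ch] > p:
--                 p = seen[ch]
--             seen[ch] = i
--         if p == -1:
--             return end
--         end += p + 1
--     return None
-- ===== Notes on version B (the rewrite author's own statement) =====
-- stated objective: faster
-- what changed: Replaces A's incrementally maintained window list (inner marker.index scan + slice per character, evolving state) by stateless per-window duplicate checks with a skip: each candidate end position scans its fixed window line[end-L:end] once and, on a duplicate pair, jumps past every end position whose window must still contain that pair.
import Mathlib
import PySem

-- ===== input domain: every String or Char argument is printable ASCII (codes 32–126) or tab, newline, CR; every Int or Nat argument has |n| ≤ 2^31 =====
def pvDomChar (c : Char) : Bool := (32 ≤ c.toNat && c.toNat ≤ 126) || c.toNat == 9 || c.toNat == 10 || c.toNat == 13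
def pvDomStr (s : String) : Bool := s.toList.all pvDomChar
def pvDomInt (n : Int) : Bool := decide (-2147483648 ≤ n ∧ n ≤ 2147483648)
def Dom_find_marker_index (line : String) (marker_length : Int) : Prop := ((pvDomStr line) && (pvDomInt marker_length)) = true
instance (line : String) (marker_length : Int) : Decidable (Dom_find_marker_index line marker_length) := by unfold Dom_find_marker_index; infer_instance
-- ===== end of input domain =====

-- B replaces A's incrementally maintained window list (inner marker.index scan + slice, evolving
-- state) by stateless per-window duplicate checks with a skip: each candidate end position scans
-- the fixed window line[end-L:end] once and, on a duplicate, jumps past every end position whose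
-- window must still contain that duplicate pair (objective: faster on duplicate-heavy input).

-- ===== PORT A =====
-- loop over enumerate(line) carrying the current `marker` list
def fmiA_loop (marker_length : Int) : List Char → Nat → List Char → Option Int
  | [], _, _ => none
  | character :: rest, idx, marker =>
    -- try: index = marker.index(character); marker = marker[index + 1::]  / except ValueError: pass
    let marker :=
      match PySem.List.index? marker character with
      | some index => PySem.List.slice marker (some ((index : Int) + 1)) none
      | none => marker
    let marker := marker ++ [character]
    if (marker.length : Int) = marker_length then some ((idx : Int) + 1)
    else fmiA_loop marker_length rest (idx + 1) marker

def find_marker_index (line : String) (marker_length : Int) : Option Int :=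
  fmiA_loop marker_length line.toList 0 []

-- ===== PORT B =====
-- inner loop body: 'if ch in seen and seen[ch] > p: p = seen[ch]; seen[ch] = i'
def fmiB_step (st : PySem.Dict Char Int × Int) (ic : Int × Char) : PySem.Dict Char Int × Int :=
  (PySem.Dict.insert st.1 ic.2 ic.1,
    match PySem.Dict.get? st.1 ic.2 with
    | some q => if q > st.2 then q else st.2
    | none => st.2)

-- 'seen = {}; p = -1; for i, ch in enumerate(window): ...' — the computed p
def fmiB_p (window : List Char) : Int :=
  ((PySem.List.enumerate window).foldl fmiB_step (PySem.Dict.empty, -1)).2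

-- p only ever grows from its initial value -1 (cited by fmiB_loop's termination proof)
lemma fmiB_p_ge (window : List Char) : -1 ≤ fmiB_p window := by
  have key : ∀ (l : List (Int × Char)) (st : PySem.Dict Char Int × Int),
      st.2 ≤ (l.foldl fmiB_step st).2 := by
    intro l
    induction l with
    | nil => intro st; exact le_refl _
    | cons ic l ih =>
      intro st
      refine le_trans ?_ (ih (fmiB_step st ic))
      unfold fmiB_step
      dsimp only
      cases PySem.Dict.get? st.1 ic.2 with
      | none => exact le_refl _
      | some q =>
        simp only
        split_ifs with h
        · omega
        · exact le_refl _
  exact key _ _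

-- 'while end <= len(line): window = line[end-L:end]; ... if p == -1: return end; end += p + 1'
def fmiB_loop (cs : List Char) (ml : Int) (end_ : Int) : Option Int :=
  if hend : end_ ≤ (cs.length : Int) then
    let window := PySem.List.slice cs (some (end_ - ml)) (some end_)
    let p := fmiB_p window
    if hp : p = -1 then some end_
    else fmiB_loop cs ml (end_ + p + 1)
  else none
termination_by ((cs.length : Int) + 1 - end_).toNat
decreasing_by
  have h1 := fmiB_p_ge window
  have h2 : fmiB_p window = fmiB_p (PySem.List.slice cs (some (end_ - ml)) (some end_)) := rfl
  omega

def find_marker_index_alt (line : String) (marker_length : Int) : Option Int :=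
  if marker_length < 1 then none
  else fmiB_loop line.toList marker_length marker_length

-- ===== PRECONDITION & SPEC =====
def Spec_find_marker_index (line : String) (marker_length : Int) (out : Option Int) : Prop := out = find_marker_index_alt line marker_length
instance (line : String) (marker_length : Int) (out : Option Int) : Decidable (Spec_find_marker_index line marker_length out) := by unfold Spec_find_marker_index; infer_instance

-- ===== CLAIM (what is proved, stated in full; the proofs are below) =====
def Claim_equal_find_marker_index : Prop := ∀ (line : String) (marker_length : Int), Dom_find_marker_index line marker_length → Spec_find_marker_index line marker_length (find_marker_index line marker_length)

-- ===== LEMMAS AND PROOFS =====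

-- proof-side helper: the naive linear scan of candidate end positions (not a port)
def pvLinScan (cs : List Char) (marker_length : Int) : List Int → Option Int
  | [] => none
  | e :: rest =>
    if ((PySem.Set.ofList (PySem.List.slice cs (some (e - marker_length)) (some e))).length : Int) = marker_length
    then some e
    else pvLinScan cs marker_length rest


lemma pv_len_ofList_iff (xs : List Char) :
    (PySem.Set.ofList xs).length = xs.length ↔ xs.Nodup := by
  induction xs using List.reverseRecOn with
  | nil => simp
  | append_singleton xs x ih =>
    have hstep : PySem.Set.ofList (xs ++ [x]) = PySem.Set.add (PySem.Set.ofList xs) x := by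
      simp [PySem.Set.ofList_eq_foldl, List.foldl_append]
    have hle := PySem.Set.length_ofList_le (xs := xs)
    by_cases hx : x ∈ xs
    · have hc : PySem.Set.contains (PySem.Set.ofList xs) x = true := by
        simp [PySem.Set.contains, PySem.Set.mem_ofList, hx]
      rw [hstep, PySem.Set.add, if_pos hc]
      simp only [List.length_append, List.length_singleton, List.nodup_append,
        List.nodup_singleton]
      constructor
      · intro h; omega
      · rintro ⟨-, -, hd⟩; exact (hd x hx x List.mem_cons_self rfl).elim
    · have hc : ¬ PySem.Set.contains (PySem.Set.ofList xs) x = true := by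
        simp [PySem.Set.contains, PySem.Set.mem_ofList, hx]
      rw [hstep, PySem.Set.add, if_neg hc]
      simp only [List.length_append, List.length_singleton, List.nodup_append,
        List.nodup_singleton]
      rw [← ih]
      constructor
      · intro h; exact ⟨by omega, trivial, fun a ha b hb hab => hx (by simp at hb; subst hb; exact hab ▸ ha)⟩
      · rintro ⟨h, -, -⟩; omega

lemma pv_A_none_of_lt_one (ml : Int) (hml : ml < 1) :
    ∀ (rest : List Char) (idx : Nat) (marker : List Char),
      fmiA_loop ml rest idx marker = none := by
  intro rest
  induction rest with
  | nil => intro idx marker; rfl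
  | cons c rest ih =>
    intro idx marker
    rw [fmiA_loop]
    have : ∀ m2 : List Char, ¬ (((m2 ++ [c]).length : Nat) : Int) = ml := by
      intro m2
      simp only [List.length_append, List.length_singleton]
      push_cast; omega
    cases hidx : PySem.List.index? marker c
    · rw [if_neg (this _)]; exact ih _ _
    · rw [if_neg (this _)]; exact ih _ _

lemma pv_scan_append_fail (cs : List Char) (ml : Int) (l1 l2 : List Int)
    (h : ∀ e ∈ l1, ¬ (((PySem.Set.ofList (PySem.List.slice cs (some (e - ml)) (some e))).length : Int) = ml)) :
    pvLinScan cs ml (l1 ++ l2) = pvLinScan cs ml l2 := by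
  induction l1 with
  | nil => rfl
  | cons e l1 ih =>
    rw [List.cons_append, pvLinScan, if_neg (h e List.mem_cons_self)]
    exact ih (fun x hx => h x (List.mem_cons_of_mem _ hx))

lemma pv_cond_iff (cs : List Char) (m e : Nat) (hme : m ≤ e) (hel : e ≤ cs.length) :
    (((PySem.Set.ofList (PySem.List.slice cs (some ((e : Int) - (m : Int))) (some (e : Int)))).length : Int) = (m : Int))
      ↔ ((cs.take e).drop (e - m)).Nodup := by
  have h1 : (e : Int) - (m : Int) = ((e - m : Nat) : Int) := by omega
  rw [h1, PySem.List.slice_natCast]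
  have h2 : e - (e - m) = m := by omega
  rw [h2]
  have hlen : ((cs.drop (e - m)).take m).length = m := by
    simp; omega
  rw [List.drop_take, h2]
  constructor
  · intro h
    exact (pv_len_ofList_iff _).1 (by rw [hlen]; exact_mod_cast h)
  · intro h
    have := (pv_len_ofList_iff _).2 h
    rw [this, hlen]


-- windows ending inside the already-processed prefix p of cs fail B's test
lemma pv_fail_upto (cs p t : List Char) (hcs : cs = p ++ t) (m : Nat) (hm : 1 ≤ m)
    (hJ3 : ∀ e, m ≤ e → e ≤ p.length → ¬ ((p.take e).drop (e - m)).Nodup)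
    (e : Int) (he : (m : Int) ≤ e) (he2 : e ≤ (p.length : Int)) :
    ¬ (((PySem.Set.ofList (PySem.List.slice cs (some (e - (m : Int))) (some e))).length : Int) = (m : Int)) := by
  have he0 : e = ((e.toNat : Nat) : Int) := by omega
  rw [he0]
  have h1 : m ≤ e.toNat := by omega
  have h2 : e.toNat ≤ p.length := by omega
  have h3 : e.toNat ≤ cs.length := by rw [hcs]; simp; omega
  rw [pv_cond_iff cs m e.toNat h1 h3]
  have h4 : cs.take e.toNat = p.take e.toNat := by
    rw [hcs, List.take_append_of_le_length h2]
  rw [h4]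
  exact hJ3 e.toNat h1 h2

-- maintenance of "every suffix of p++[c] longer than the new marker has a duplicate"
lemma pv_J2_step (p marker marker2 : List Char) (c : Char)
    (hsuf : marker <:+ p)
    (hJ2 : ∀ k, marker.length < k → k ≤ p.length → ¬ (p.drop (p.length - k)).Nodup)
    (hmid : ∀ s : List Char, s <:+ p → marker2.length ≤ s.length → s.length ≤ marker.length → c ∈ s) :
    ∀ k, marker2.length < k → k ≤ p.length + 1 → ¬ ((p ++ [c]).drop (p.length + 1 - k)).Nodup := by
  intro k hk hk'
  have hk1 : 1 ≤ k := by omega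
  have hdl : p.length + 1 - k = p.length - (k - 1) := by omega
  have hdle : p.length - (k - 1) ≤ p.length := by omega
  rw [hdl, List.drop_append_of_le_length hdle]
  by_cases hbig : marker.length < k - 1
  · intro hn
    exact hJ2 (k - 1) hbig (by omega) hn.of_append_left
  · -- k - 1 ≤ marker.length, and marker2.length ≤ k - 1, so c is already in the suffix
    set s := p.drop (p.length - (k - 1)) with hs
    have hssuf : s <:+ p := List.drop_suffix _ _
    have hmlen : marker.length ≤ p.length := hsuf.length_le
    have hslen : s.length = k - 1 := by rw [hs, List.length_drop]; omega
    have hcs : c ∈ s := hmid s hssuf (by omega) (by omega)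
    intro hn
    rcases List.nodup_append.mp hn with ⟨-, -, hd⟩
    exact hd c hcs c List.mem_cons_self rfl

-- when the new marker reaches length m, B's scan returns p.length + 1
lemma pv_ret (cs p rest' : List Char) (c : Char) (m : Nat) (hm : 1 ≤ m)
    (hcs : cs = p ++ c :: rest')
    (marker2 : List Char) (h2suf : marker2 <:+ p ++ [c]) (h2nd : marker2.Nodup)
    (h2len : marker2.length = m)
    (hJ3 : ∀ e, m ≤ e → e ≤ p.length → ¬ ((p.take e).drop (e - m)).Nodup) :
    pvLinScan cs (m : Int) (PySem.List.pyRange (m : Int) ((cs.length : Int) + 1) 1)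
      = some ((p.length : Int) + 1) := by
  have hlcs : cs.length = p.length + 1 + rest'.length := by rw [hcs]; simp; omega
  have hmle : m ≤ p.length + 1 := by
    have := h2suf.length_le; simp at this; omega
  rw [PySem.List.pyRange_one_append (m : Int) ((p.length : Int) + 1) ((cs.length : Int) + 1)
        (by omega) (by omega)]
  rw [pv_scan_append_fail _ _ _ _ (by
    intro e hee
    rw [PySem.List.mem_pyRange_one] at hee
    exact pv_fail_upto cs p (c :: rest') hcs m hm hJ3 e hee.1 (by omega))]
  rw [PySem.List.pyRange_one_cons (by omega)]
  rw [pvLinScan]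
  have hcast : (p.length : Int) + 1 = (((p.length + 1 : Nat)) : Int) := by push_cast; ring
  rw [if_pos ?_]
  rw [hcast, pv_cond_iff cs m (p.length + 1) hmle (by omega)]
  have htake : cs.take (p.length + 1) = p ++ [c] := by
    have h5 : cs = (p ++ [c]) ++ rest' := by rw [hcs]; simp
    rw [h5, List.take_append_of_le_length (by simp)]
    exact List.take_of_length_le (by simp)
  rw [htake]
  have : marker2 = (p ++ [c]).drop ((p ++ [c]).length - marker2.length) :=
    List.suffix_iff_eq_drop.mp h2suf
  have hlen2 : (p ++ [c]).length - marker2.length = p.length + 1 - m := by simp [h2len]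
  rw [hlen2] at this
  rw [← this]
  exact h2nd

lemma pv_main (cs : List Char) (m : Nat) (hm : 1 ≤ m) :
    ∀ (rest p marker : List Char),
      cs = p ++ rest →
      marker <:+ p →
      marker.Nodup →
      marker.length < m →
      (∀ k, marker.length < k → k ≤ p.length → ¬ (p.drop (p.length - k)).Nodup) →
      (∀ e, m ≤ e → e ≤ p.length → ¬ ((p.take e).drop (e - m)).Nodup) →
      fmiA_loop (m : Int) rest p.length marker
        = pvLinScan cs (m : Int) (PySem.List.pyRange (m : Int) ((cs.length : Int) + 1) 1) := by
  intro rest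
  induction rest with
  | nil =>
    intro p marker hcs hsuf hnd hlen hJ2 hJ3
    have hpc : p = cs := by rw [hcs, List.append_nil]
    subst hpc
    rw [fmiA_loop, ← List.append_nil (PySem.List.pyRange _ _ _)]
    rw [pv_scan_append_fail _ _ _ _ (by
      intro e hee
      rw [PySem.List.mem_pyRange_one] at hee
      exact pv_fail_upto p p [] (by simp) m hm hJ3 e hee.1 (by omega))]
    rfl
  | cons c rest' ih =>
    intro p marker hcs hsuf hnd hlen hJ2 hJ3
    rw [fmiA_loop]
    cases hidx : PySem.List.index? marker c with
    | some i =>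
      obtain ⟨pre, suf, hmark, hpl, hcpre⟩ := (PySem.List.index?_eq_some_iff _ _ _).1 hidx
      subst hmark
      have hnd' := hnd
      simp only [List.nodup_append, List.nodup_cons] at hnd'
      obtain ⟨hprend, ⟨hcsuf, hsufnd⟩, hdisj⟩ := hnd'
      have hslice : PySem.List.slice (pre ++ c :: suf) (some ((i : Int) + 1)) none = suf := by
        have h1 : ((i : Int) + 1) = ((i + 1 : Nat) : Int) := by push_cast; ring
        rw [h1, PySem.List.slice_from_natCast]
        have h2 : pre ++ c :: suf = (pre ++ [c]) ++ suf := by simp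
        have h3 : i + 1 = (pre ++ [c]).length := by simp [hpl]
        rw [h2, h3, List.drop_left]
      simp only [hslice]
      obtain ⟨q, hq⟩ := hsuf
      have h2suf : suf ++ [c] <:+ p ++ [c] :=
        ⟨q ++ pre ++ [c], by rw [← hq]; simp⟩
      have h2nd : (suf ++ [c]).Nodup := by
        rw [List.nodup_append]
        exact ⟨hsufnd, List.nodup_singleton c,
          by intro a ha b hb hab; simp at hb; subst hb; exact hcsuf (hab ▸ ha)⟩
      have h2len : (suf ++ [c]).length = suf.length + 1 := by simp
      have hmlen : (pre ++ c :: suf).length ≤ p.length := List.IsSuffix.length_le ⟨q, hq⟩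
      have hJ2' := pv_J2_step p (pre ++ c :: suf) (suf ++ [c]) c ⟨q, hq⟩ hJ2 (by
        intro s hsp hsl hsl2
        have hcsufm : c :: suf <:+ pre ++ c :: suf := ⟨pre, rfl⟩
        have hsm : s <:+ pre ++ c :: suf :=
          List.suffix_of_suffix_length_le hsp ⟨q, hq⟩ (by omega)
        have : c :: suf <:+ s :=
          List.suffix_of_suffix_length_le hcsufm hsm (by simp at hsl ⊢; omega)
        exact this.subset List.mem_cons_self)
      by_cases hml : (((suf ++ [c]).length : Nat) : Int) = (m : Int)
      · rw [if_pos hml]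
        have h2lenm : (suf ++ [c]).length = m := by exact_mod_cast hml
        rw [pv_ret cs p rest' c m hm hcs _ h2suf h2nd h2lenm hJ3]
      · rw [if_neg hml]
        have hcs' : cs = (p ++ [c]) ++ rest' := by rw [hcs]; simp
        have hplen : (p ++ [c]).length = p.length + 1 := by simp
        have hlen' : pre.length + (suf.length + 1) < m := by simpa using hlen
        have := ih (p ++ [c]) (suf ++ [c]) hcs' h2suf h2nd
          (by simp; omega)
          (by rw [hplen]; exact hJ2')
          (by
            intro e hee hee'
            rw [hplen] at hee'
            by_cases he : e ≤ p.length
            · rw [List.take_append_of_le_length he]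
              exact hJ3 e hee he
            · have heq : e = p.length + 1 := by omega
              subst heq
              rw [List.take_of_length_le (by simp)]
              have hml' : (suf ++ [c]).length < m := by
                have hne : ¬ (suf ++ [c]).length = m := by
                  intro hh; exact hml (by exact_mod_cast hh)
                simp at hne ⊢; omega
              exact hJ2' m hml' (by omega))
        rw [hplen] at this
        exact this
    | none =>
      have hcm : c ∉ marker := (PySem.List.index?_eq_none_iff _ _).1 hidx
      obtain ⟨q, hq⟩ := hsuf
      have h2suf : marker ++ [c] <:+ p ++ [c] := ⟨q, by rw [← hq]; simp⟩
      have h2nd : (marker ++ [c]).Nodup := by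
        rw [List.nodup_append]
        exact ⟨hnd, List.nodup_singleton c,
          by intro a ha b hb hab; simp at hb; subst hb; exact hcm (hab ▸ ha)⟩
      have hJ2' := pv_J2_step p marker (marker ++ [c]) c ⟨q, hq⟩ hJ2 (by
        intro s hsp hsl hsl2
        exfalso
        simp at hsl
        omega)
      by_cases hml : (((marker ++ [c]).length : Nat) : Int) = (m : Int)
      · rw [if_pos hml]
        rw [pv_ret cs p rest' c m hm hcs _ h2suf h2nd (by exact_mod_cast hml) hJ3]
      · rw [if_neg hml]
        have hcs' : cs = (p ++ [c]) ++ rest' := by rw [hcs]; simp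
        have hplen : (p ++ [c]).length = p.length + 1 := by simp
        have hne : ¬ (marker ++ [c]).length = m := by
          intro hh; exact hml (by exact_mod_cast hh)
        have := ih (p ++ [c]) (marker ++ [c]) hcs' h2suf h2nd
          (by simp at hne ⊢; omega)
          (by rw [hplen]; exact hJ2')
          (by
            intro e hee hee'
            rw [hplen] at hee'
            by_cases he : e ≤ p.length
            · rw [List.take_append_of_le_length he]
              exact hJ3 e hee he
            · have heq : e = p.length + 1 := by omega
              subst heq
              rw [List.take_of_length_le (by simp)]
              have hml' : (marker ++ [c]).length < m := by simp at hne ⊢; omega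
              exact hJ2' m hml' (by omega))
        rw [hplen] at this
        exact this


-- a window that contains two equal characters of cs is not duplicate-free
lemma pv_not_nodup_of_pair (l : List Char) (i j : Nat) (hij : i < j) (hj : j < l.length)
    (he : l[i]? = l[j]?) : ¬ l.Nodup := by
  intro h
  rw [List.getElem?_eq_getElem (by omega), List.getElem?_eq_getElem hj] at he
  have := (List.Nodup.getElem_inj_iff h).mp (Option.some_injective _ he)
  omega

-- invariant of B's inner loop over the processed prefix u of the window:
-- seen maps each character of u to one of its occurrence indexes, and either
-- p = -1 and u is duplicate-free, or p is the earlier index of a duplicate pair in u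
def pvInv (u : List Char) (seen : PySem.Dict Char Int) (p : Int) : Prop :=
  (∀ d q, PySem.Dict.get? seen d = some q →
      ∃ qn : Nat, q = (qn : Int) ∧ qn < u.length ∧ u[qn]? = some d) ∧
  (∀ d, d ∈ u → (PySem.Dict.get? seen d).isSome) ∧
  ((p = -1 ∧ u.Nodup) ∨ (∃ pn i : Nat, p = (pn : Int) ∧ pn < i ∧ i < u.length ∧ u[pn]? = u[i]?))

lemma pv_inv_fold :
    ∀ (xs u : List Char) (seen : PySem.Dict Char Int) (p : Int),
      pvInv u seen p →
      pvInv (u ++ xs)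
        ((PySem.List.enumerate xs (u.length : Int)).foldl fmiB_step (seen, p)).1
        ((PySem.List.enumerate xs (u.length : Int)).foldl fmiB_step (seen, p)).2 := by
  intro xs
  induction xs with
  | nil => intro u seen p h; simpa using h
  | cons x xs ih =>
    intro u seen p h
    obtain ⟨h1, h2, h3⟩ := h
    rw [PySem.List.enumerate_cons, List.foldl_cons]
    have hstep : pvInv (u ++ [x]) (fmiB_step (seen, p) ((u.length : Int), x)).1
        (fmiB_step (seen, p) ((u.length : Int), x)).2 := by
      unfold fmiB_step
      dsimp only
      refine ⟨?_, ?_, ?_⟩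
      · intro d q hq
        by_cases hdx : d = x
        · subst hdx
          rw [PySem.Dict.get?_insert_self] at hq
          cases hq
          exact ⟨u.length, rfl, by simp, List.getElem?_concat_length⟩
        · rw [PySem.Dict.get?_insert_of_ne _ _ hdx] at hq
          obtain ⟨qn, rfl, hlt, hget⟩ := h1 d q hq
          exact ⟨qn, rfl, by simp; omega, by rw [List.getElem?_append_left hlt]; exact hget⟩
      · intro d hd
        by_cases hdx : d = x
        · subst hdx; rw [PySem.Dict.get?_insert_self]; rfl
        · rw [PySem.Dict.get?_insert_of_ne _ _ hdx]
          exact h2 d (by simp at hd; tauto)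
      · cases hg : PySem.Dict.get? seen x with
        | none =>
          rcases h3 with ⟨hp, hnd⟩ | ⟨pn, i, hp, hpi, hil, hpair⟩
          · refine Or.inl ⟨hp, ?_⟩
            rw [List.nodup_append]
            refine ⟨hnd, List.nodup_singleton x, ?_⟩
            intro a ha b hb hab
            simp at hb
            subst hb
            subst hab
            have hsx := h2 a ha
            rw [hg] at hsx
            simp at hsx
          · exact Or.inr ⟨pn, i, hp, hpi, by simp; omega,
              by rw [List.getElem?_append_left (by omega), List.getElem?_append_left hil]; exact hpair⟩
        | some q =>
          obtain ⟨qn, rfl, hlt, hget⟩ := h1 x q hg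
          dsimp only
          split_ifs with hqp
          · refine Or.inr ⟨qn, u.length, rfl, hlt, by simp, ?_⟩
            rw [List.getElem?_append_left hlt, List.getElem?_concat_length]
            exact hget
          · rcases h3 with ⟨hp, hnd⟩ | ⟨pn, i, hp, hpi, hil, hpair⟩
            · exfalso; omega
            · exact Or.inr ⟨pn, i, hp, hpi, by simp; omega,
                by rw [List.getElem?_append_left (by omega), List.getElem?_append_left hil]; exact hpair⟩
    have := ih (u ++ [x]) _ _ hstep
    have hcast : ((u ++ [x]).length : Int) = (u.length : Int) + 1 := by simp
    rw [hcast] at this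
    simpa using this

-- what B's inner loop computes: p = -1 exactly on a duplicate-free window,
-- otherwise p is the earlier index of a duplicate pair
lemma pv_fmiB_p_spec (w : List Char) :
    (fmiB_p w = -1 ∧ w.Nodup) ∨
    (∃ pn i : Nat, fmiB_p w = (pn : Int) ∧ pn < i ∧ i < w.length ∧ w[pn]? = w[i]?) := by
  have h0 : pvInv [] PySem.Dict.empty (-1) := by
    refine ⟨?_, ?_, Or.inl ⟨rfl, List.nodup_nil⟩⟩
    · intro d q hq; rw [PySem.Dict.get?_empty] at hq; cases hq
    · intro d hd; cases hd
  have := pv_inv_fold w [] PySem.Dict.empty (-1) h0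
  simp only [List.nil_append] at this
  exact this.2.2

-- the slice B tests is the window of the last m characters before position e
lemma pv_slice_window (cs : List Char) (m e : Nat) (hme : m ≤ e) :
    PySem.List.slice cs (some ((e : Int) - (m : Int))) (some (e : Int))
      = (cs.take e).drop (e - m) := by
  have h1 : (e : Int) - (m : Int) = ((e - m : Nat) : Int) := by omega
  rw [h1, PySem.List.slice_natCast, List.drop_take]

-- every window that still contains a duplicate pair of cs fails
lemma pv_window_dup (cs : List Char) (m e a b : Nat) (hm : 1 ≤ m) (hme : m ≤ e)
    (hel : e ≤ cs.length) (hab : a < b) (hbe : b < e) (hea : e - m ≤ a)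
    (hpair : cs[a]? = cs[b]?) :
    ¬ ((cs.take e).drop (e - m)).Nodup := by
  have hW : ∀ j, e - m + j < e → ((cs.take e).drop (e - m))[j]? = cs[e - m + j]? := by
    intro j hj
    rw [List.getElem?_drop, List.getElem?_take_of_lt hj]
  have hlen : ((cs.take e).drop (e - m)).length = m := by simp; omega
  apply pv_not_nodup_of_pair _ (a - (e - m)) (b - (e - m)) (by omega) (by omega)
  rw [hW _ (by omega), hW _ (by omega)]
  have h1 : e - m + (a - (e - m)) = a := by omega
  have h2 : e - m + (b - (e - m)) = b := by omega
  rw [h1, h2]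
  exact hpair

-- the linear scan and B's jumping loop agree from any start position
lemma pv_lin_eq_jump (cs : List Char) (m : Nat) (hm : 1 ≤ m) :
    ∀ (e0 : Nat), m ≤ e0 →
      pvLinScan cs (m : Int) (PySem.List.pyRange (e0 : Int) ((cs.length : Int) + 1) 1)
        = fmiB_loop cs (m : Int) (e0 : Int) := by
  suffices H : ∀ (k e0 : Nat), cs.length + 1 - e0 ≤ k → m ≤ e0 →
      pvLinScan cs (m : Int) (PySem.List.pyRange (e0 : Int) ((cs.length : Int) + 1) 1)
        = fmiB_loop cs (m : Int) (e0 : Int) by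
    exact fun e0 he => H _ e0 le_rfl he
  intro k
  induction k with
  | zero =>
    intro e0 hk he
    have hbig : cs.length < e0 := by omega
    unfold fmiB_loop
    rw [dif_neg (by omega),
      PySem.List.pyRange_one_eq_nil (by omega)]
    rfl
  | succ k ihk =>
    intro e0 hk he
    unfold fmiB_loop
    by_cases hend : (e0 : Int) ≤ (cs.length : Int)
    · rw [dif_pos hend]
      have hel : e0 ≤ cs.length := by exact_mod_cast hend
      dsimp only
      rw [pv_slice_window cs m e0 he]
      rcases pv_fmiB_p_spec ((cs.take e0).drop (e0 - m)) with ⟨hp, hnd⟩ | ⟨pn, i, hp, hpi, hil, hpair⟩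
      · rw [dif_pos hp]
        rw [PySem.List.pyRange_one_cons (by omega), pvLinScan,
          if_pos (by
            rw [pv_slice_window cs m e0 he, (pv_len_ofList_iff _).2 hnd]
            simp
            omega)]
      · rw [dif_neg (by omega)]
        -- the window has length m, so its duplicate pair sits at cs positions
        have hwlen : ((cs.take e0).drop (e0 - m)).length = m := by simp; omega
        have hpcs : ∀ j, j < m → ((cs.take e0).drop (e0 - m))[j]? = cs[e0 - m + j]? := by
          intro j hj
          rw [List.getElem?_drop, List.getElem?_take_of_lt (by omega)]
        have hpair' : cs[e0 - m + pn]? = cs[e0 - m + i]? := by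
          rw [← hpcs pn (by omega), ← hpcs i (by omega)]
          exact hpair
        -- every end position in (e0, e0 + pn] (and e0 itself) fails the test
        have hfail : ∀ e : Nat, m ≤ e → e ≤ cs.length → e0 ≤ e → e ≤ e0 + pn →
            ¬ ((cs.take e).drop (e - m)).Nodup := by
          intro e h1 h2 h3 h4
          exact pv_window_dup cs m e (e0 - m + pn) (e0 - m + i) hm h1 h2
            (by omega) (by omega) (by omega) hpair'
        have hsplit := PySem.List.pyRange_one_append (e0 : Int)
          (min ((e0 : Int) + (pn : Int) + 1) ((cs.length : Int) + 1)) ((cs.length : Int) + 1)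
          (by omega) (by omega)
        rw [hsplit, pv_scan_append_fail _ _ _ _ (by
          intro e hee
          rw [PySem.List.mem_pyRange_one] at hee
          have he0 : e = ((e.toNat : Nat) : Int) := by omega
          rw [he0]
          rw [pv_cond_iff cs m e.toNat (by omega) (by omega)]
          exact hfail e.toNat (by omega) (by omega) (by omega) (by omega))]
        have hrest : PySem.List.pyRange (min ((e0 : Int) + (pn : Int) + 1) ((cs.length : Int) + 1))
            ((cs.length : Int) + 1) 1
            = PySem.List.pyRange (((e0 + pn + 1 : Nat) : Nat) : Int) ((cs.length : Int) + 1) 1 := by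
          by_cases hc : (e0 : Int) + (pn : Int) + 1 ≤ (cs.length : Int) + 1
          · congr 1; push_cast; omega
          · rw [PySem.List.pyRange_one_eq_nil (by omega),
              PySem.List.pyRange_one_eq_nil (by push_cast; omega)]
        rw [hrest, ihk (e0 + pn + 1) (by omega) (by omega)]
        congr 1
        rw [hp]
        push_cast; ring
    · rw [dif_neg hend, PySem.List.pyRange_one_eq_nil (by omega)]
      rfl

-- ===== VERDICT (by name: the statement is the Claim_ definition above) =====
theorem find_marker_index_spec : Claim_equal_find_marker_index := by
  intro line ml _
  unfold Spec_find_marker_index find_marker_index find_marker_index_alt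
  by_cases hml : ml < 1
  · rw [if_pos hml, pv_A_none_of_lt_one ml hml]
  · rw [if_neg hml]
    have hm1 : 1 ≤ ml.toNat := by omega
    have hcast : ml = ((ml.toNat : Nat) : Int) := by omega
    rw [hcast]
    have hA := pv_main line.toList ml.toNat hm1 line.toList [] []
      (by simp) (by simp) List.nodup_nil (by simp; omega)
      (by intro k hk hk'; simp at hk'; omega)
      (by intro e he he'; simp at he'; omega)
    have hB := pv_lin_eq_jump line.toList ml.toNat hm1 ml.toNat le_rfl
    simp only [List.length_nil] at hA
    rw [hA, hB]
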